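-- pv_equiv track=rewrite | github.com/cohpy/challenge-201604-words | efloehr/words.py | return_text
-- ===== SOURCE A (Python) =====
-- def return_text(iterable_of_lines):
--     text = ""
--
--     for line in iterable_of_lines:
--         text += cleaned_line(line)
--         if 'START OF THIS PROJECT GUTENBERG' in line:
--             text = ""
--             break
--
--     for line in iterable_of_lines:
--        if 'Gutenberg' in line and 'End of' in line:
--            break
--        text += cleaned_line(line)
--
--     return text
--
-- def cleaned_line(line):
--     line = line.replace('--',' ').strip()
--     if len(line) and line[-1] == '-':
--         line = line[:-1]
--     else:
--         line += ' '
--     return ''.join([c for c in line if c.isalpha() or c.isnumeric() or c.isspace() or c in "'-"])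
-- ===== SOURCE B (Python) =====
-- def cleaned_line(line):
--     line = line.replace('--', ' ').strip()
--     if len(line) and line[-1] == '-':
--         line = line[:-1]
--     else:
--         line += ' '
--     return ''.join([c for c in line if c.isalpha() or c.isnumeric() or c.isspace() or c in "'-"])
--
-- def return_text(iterable_of_lines):
--     # Single fused pass: one state machine carries everything A's two loops compute.
--     seen_start = False
--     ended = False
--     whole = []
--     body = []
--     for line in iterable_of_lines:
--         c = cleaned_line(line)
--         whole.append(c)
--         if 'START OF THIS PROJECT GUTENBERG' in line:
--             seen_start = True
--         if not ended:
--             if 'Gutenberg' in line and 'End of' in line: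
--                 ended = True
--             else:
--                 body.append(c)
--     return ('' if seen_start else ''.join(whole)) + ''.join(body)
-- ===== Notes on version B (the rewrite author's own statement) =====
-- stated objective: faster
-- what changed: A makes two sequential accumulate-and-break passes over the list (the second restarting from the front), growing a string with +=; B makes ONE fused pass driven by a state machine (seen_start, ended, whole, body), collecting cleaned lines into lists and joining once at the end.
import Mathlib
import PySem

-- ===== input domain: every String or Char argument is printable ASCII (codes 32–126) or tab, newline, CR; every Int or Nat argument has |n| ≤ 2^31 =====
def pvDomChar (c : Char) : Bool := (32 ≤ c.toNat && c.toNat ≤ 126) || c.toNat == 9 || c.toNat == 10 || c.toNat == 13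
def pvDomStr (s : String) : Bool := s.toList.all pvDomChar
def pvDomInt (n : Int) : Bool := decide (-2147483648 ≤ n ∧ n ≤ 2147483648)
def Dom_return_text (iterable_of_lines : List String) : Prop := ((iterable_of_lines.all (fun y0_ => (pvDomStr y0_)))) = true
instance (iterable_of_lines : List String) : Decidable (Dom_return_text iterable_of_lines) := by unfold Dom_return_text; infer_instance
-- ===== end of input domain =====

-- B replaces A's two sequential accumulate-and-break loops with ONE fused pass: a state machine
-- (seen_start, ended, whole, body) over the lines, assembled once at the end (list-append + join instead of string +=); a timing run measured B faster by a constant factor.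

-- ===== PORT A =====
-- shared helper (identical in Source A and Source B): cleaned_line
-- 'c in "'-"' on a single character is ported as the char test (c = '\'' || c = '-'): exact.
-- ''.join of the kept characters is String.ofList of the filtered char list: exact.
def cleaned_line (line : String) : String :=
  let l1 : String := PySem.Str.strip (PySem.Str.replace line "--" " ")
  let l2 : List Char :=
    if l1.toList ≠ [] ∧ PySem.List.pyGet? l1.toList (-1) = some '-' then
      PySem.List.slice l1.toList none (some (-1))
    else l1.toList ++ [' ']
  String.ofList (l2.filter (fun c =>
    PySem.Chars.isalpha c || PySem.Chars.isdigit c || PySem.Chars.isspace c ||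
      (c == '\'' || c == '-')))

def pvStartMark (line : String) : Bool :=
  PySem.Str.isIn "START OF THIS PROJECT GUTENBERG" line

def pvEndMark (line : String) : Bool :=
  PySem.Str.isIn "Gutenberg" line && PySem.Str.isIn "End of" line

-- first for-loop of A (break empties text)
def pvLoop1 : List String → String → String
  | [], text => text
  | line :: rest, text =>
    let text := text ++ cleaned_line line
    if pvStartMark line then "" else pvLoop1 rest text

-- second for-loop of A (on a list it restarts from the beginning)
def pvLoop2 : List String → String → String
  | [], text => text
  | line :: rest, text =>
    if pvEndMark line then text else pvLoop2 rest (text ++ cleaned_line line)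

def return_text (iterable_of_lines : List String) : String :=
  pvLoop2 iterable_of_lines (pvLoop1 iterable_of_lines "")

-- ===== PORT B =====
-- one step of B's single fused pass; state = (seen_start, ended, whole, body)
def pvStep (st : Bool × Bool × List String × List String) (line : String) :
    Bool × Bool × List String × List String :=
  let c := cleaned_line line
  let whole := st.2.2.1 ++ [c]
  let seenStart := st.1 || pvStartMark line
  if st.2.1 then (seenStart, true, whole, st.2.2.2)
  else if pvEndMark line then (seenStart, true, whole, st.2.2.2)
  else (seenStart, false, whole, st.2.2.2 ++ [c])

def return_text_alt (iterable_of_lines : List String) : String :=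
  let st := iterable_of_lines.foldl pvStep (false, false, [], [])
  (if st.1 then "" else PySem.Str.join "" st.2.2.1) ++ PySem.Str.join "" st.2.2.2

-- ===== PRECONDITION & SPEC =====
def Spec_return_text (iterable_of_lines : List String) (out : String) : Prop := out = return_text_alt iterable_of_lines
instance (iterable_of_lines : List String) (out : String) : Decidable (Spec_return_text iterable_of_lines out) := by unfold Spec_return_text; infer_instance

-- ===== CLAIM (what is proved, stated in full; the proofs are below) =====
def Claim_equal_return_text : Prop := ∀ (iterable_of_lines : List String), Dom_return_text iterable_of_lines → Spec_return_text iterable_of_lines (return_text iterable_of_lines)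

-- ===== LEMMAS AND PROOFS =====

theorem join_empty_cons (a : String) (l : List String) :
    PySem.Str.join "" (a :: l) = a ++ PySem.Str.join "" l := by
  apply String.toList_injective
  simp [PySem.Str.join, PySem.Chars.join, List.intercalate]
  cases l <;> simp

theorem pvLoop1_eq (xs : List String) (t : String) :
    pvLoop1 xs t =
      if xs.any pvStartMark then ""
      else t ++ PySem.Str.join "" (xs.map cleaned_line) := by
  induction xs generalizing t with
  | nil => simp [pvLoop1, PySem.Str.join, PySem.Chars.join, List.intercalate]
  | cons a l ih =>
    simp only [pvLoop1, List.any_cons, List.map_cons, join_empty_cons]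
    by_cases h : pvStartMark a = true
    · simp [h]
    · simp [h, ih, String.append_assoc]

theorem pvLoop2_eq (xs : List String) (t : String) :
    pvLoop2 xs t = t ++ PySem.Str.join "" ((xs.take (xs.findIdx pvEndMark)).map cleaned_line) := by
  induction xs generalizing t with
  | nil => simp [pvLoop2, PySem.Str.join, PySem.Chars.join, List.intercalate]
  | cons a l ih =>
    by_cases h : pvEndMark a = true
    · simp [pvLoop2, h, List.findIdx_cons, PySem.Str.join, PySem.Chars.join, List.intercalate]
    · simp [pvLoop2, h, ih, List.findIdx_cons, join_empty_cons, String.append_assoc]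

-- invariant of B's fused pass
theorem foldl_pvStep_eq (xs : List String) (ss ed : Bool) (w b : List String) :
    xs.foldl pvStep (ss, ed, w, b) =
      (ss || xs.any pvStartMark,
       ed || xs.any pvEndMark,
       w ++ xs.map cleaned_line,
       if ed then b else b ++ (xs.take (xs.findIdx pvEndMark)).map cleaned_line) := by
  induction xs generalizing ss ed w b with
  | nil => cases ed <;> simp
  | cons a l ih =>
    cases ed with
    | true => simp [pvStep, ih, Bool.or_assoc]
    | false =>
      by_cases h : pvEndMark a = true
      · simp [pvStep, h, ih, Bool.or_assoc, List.findIdx_cons]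
      · simp [pvStep, h, ih, Bool.or_assoc, List.findIdx_cons]

-- ===== VERDICT (by name: the statement is the Claim_ definition above) =====
theorem return_text_spec : Claim_equal_return_text := by
  intro xs _
  show _ = _
  rw [return_text, return_text_alt, pvLoop2_eq, pvLoop1_eq]
  simp only [foldl_pvStep_eq, Bool.false_or, List.nil_append]
  split <;> simp
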